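-- pv_equiv track=rewrite | github.com/vigneshsabapathi/python-algorithms | other/bankers_algorithm_optimized.py | all_safe_sequences
-- ===== SOURCE A (Python) =====
-- def all_safe_sequences(
--     allocation: list[list[int]],
--     max_need: list[list[int]],
--     available: list[int],
-- ) -> list[list[int]]:
--     """
--     Find ALL safe sequences using backtracking.
--
--     >>> seqs = all_safe_sequences([[1]], [[1]], [0])
--     >>> [0] in seqs
--     True
--     >>> seqs = all_safe_sequences([[0, 1], [1, 0]], [[1, 1], [1, 1]], [0, 0])
--     >>> len(seqs)
--     0
--     """
--     n = len(allocation)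
--     m = len(available)
--     need = [[max_need[i][j] - allocation[i][j] for j in range(m)] for i in range(n)]
--     results: list[list[int]] = []
--
--     def backtrack(work: list[int], done: list[bool], seq: list[int]) -> None:
--         if len(seq) == n:
--             results.append(list(seq))
--             return
--         for i in range(n):
--             if not done[i] and all(need[i][j] <= work[j] for j in range(m)):
--                 new_work = [work[j] + allocation[i][j] for j in range(m)]
--                 done[i] = True
--                 seq.append(i)
--                 backtrack(new_work, done, seq)
--                 seq.pop()
--                 done[i] = False
--
--     backtrack(available[:], [False] * n, [])
--     return results
-- ===== SOURCE B (Python) =====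
-- def all_safe_sequences(
--     allocation: list[list[int]],
--     max_need: list[list[int]],
--     available: list[int],
-- ) -> list[list[int]]:
--     """Generate-and-test: enumerate all permutations of the processes in
--     lexicographic order and keep those whose full simulation succeeds."""
--     n = len(allocation)
--     m = len(available)
--     need = [[max_need[i][j] - allocation[i][j] for j in range(m)] for i in range(n)]
--
--     def perms(xs: list[int]) -> list[list[int]]:
--         if not xs:
--             return [[]]
--         out: list[list[int]] = []
--         for k in range(len(xs)):
--             for p in perms(xs[:k] + xs[k + 1:]):
--                 out.append([xs[k]] + p)
--         return out
--
--     def ok(perm: list[int]) -> bool: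
--         work = available[:]
--         for i in perm:
--             if not all(need[i][j] <= work[j] for j in range(m)):
--                 return False
--             work = [work[j] + allocation[i][j] for j in range(m)]
--         return True
--
--     return [perm for perm in perms(list(range(n))) if ok(perm)]
-- ===== Notes on version B (the rewrite author's own statement) =====
-- stated objective: alternative
-- what changed: Replaced the mutating recursive backtracking over done-flags by a pure generate-and-test: enumerate all permutations of range(n) in lexicographic order and keep those whose full work-vector simulation succeeds.
import Mathlib
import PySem

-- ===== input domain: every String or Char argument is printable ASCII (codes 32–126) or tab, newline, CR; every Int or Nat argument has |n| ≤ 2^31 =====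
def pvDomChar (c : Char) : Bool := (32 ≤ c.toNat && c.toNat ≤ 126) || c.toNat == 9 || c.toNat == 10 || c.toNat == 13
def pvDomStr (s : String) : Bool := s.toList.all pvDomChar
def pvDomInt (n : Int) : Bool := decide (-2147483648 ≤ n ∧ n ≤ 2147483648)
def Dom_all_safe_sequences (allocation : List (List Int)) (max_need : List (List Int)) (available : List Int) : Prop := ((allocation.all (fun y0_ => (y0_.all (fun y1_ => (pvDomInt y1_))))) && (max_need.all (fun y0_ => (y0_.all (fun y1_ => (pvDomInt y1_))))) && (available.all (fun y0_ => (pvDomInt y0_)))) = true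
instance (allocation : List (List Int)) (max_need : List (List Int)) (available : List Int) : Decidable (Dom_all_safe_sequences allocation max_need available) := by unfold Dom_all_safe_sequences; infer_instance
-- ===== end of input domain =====

-- B replaces A's mutating recursive backtracking by a pure generate-and-test over all
-- lexicographic permutations of range(n); same return value, no speed claim.

-- ===== PORT A =====
-- need = [[max_need[i][j] - allocation[i][j] for j in range(m)] for i in range(n)]  (shared by both Pythons verbatim)
def pvNeed (allocation max_need : List (List Int)) (n m : Int) : List (List Int) :=
  (PySem.List.pyRange 0 n 1).map (fun i => (PySem.List.pyRange 0 m 1).map (fun j =>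
    PySem.List.pyGetD (PySem.List.pyGetD max_need i []) j 0 - PySem.List.pyGetD (PySem.List.pyGetD allocation i []) j 0))

-- all(need[i][j] <= work[j] for j in range(m))  (appears verbatim in both Pythons)
def pvFeas (need : List (List Int)) (m : Int) (i : Int) (work : List Int) : Bool :=
  (PySem.List.pyRange 0 m 1).all (fun j =>
    decide (PySem.List.pyGetD (PySem.List.pyGetD need i []) j 0 ≤ PySem.List.pyGetD work j 0))

-- [work[j] + allocation[i][j] for j in range(m)]  (appears verbatim in both Pythons)
def pvNewWork (allocation : List (List Int)) (m : Int) (i : Int) (work : List Int) : List Int :=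
  (PySem.List.pyRange 0 m 1).map (fun j =>
    PySem.List.pyGetD work j 0 + PySem.List.pyGetD (PySem.List.pyGetD allocation i []) j 0)

-- A's `backtrack`, state-passed (done[i]=True / seq.append before the call, undone after:
-- functionally the recursive call receives done.set i true and seq ++ [i]); fuel only
-- guards termination (one unit per nesting level, never exhausted from the entry point).
def pvBacktrack (allocation need : List (List Int)) (n m : Int) :
    Nat → List Int → List Bool → List Int → List (List Int) → List (List Int)
  | 0, _, _, _, results => results
  | fuel+1, work, done, seq, results =>
    if (seq.length : Int) = n then results ++ [seq]
    else
      (PySem.List.pyRange 0 n 1).foldl (fun res i =>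
        if (!(PySem.List.pyGetD done i false)) && pvFeas need m i work then
          pvBacktrack allocation need n m fuel (pvNewWork allocation m i work)
            (done.set i.toNat true) (seq ++ [i]) res
        else res) results

def all_safe_sequences (allocation : List (List Int)) (max_need : List (List Int)) (available : List Int) : List (List Int) :=
  let n : Int := allocation.length
  let m : Int := available.length
  let need := pvNeed allocation max_need n m
  pvBacktrack allocation need n m (allocation.length + 1) available
    (List.replicate allocation.length false) [] []

-- ===== PORT B =====
-- perms(xs): all permutations of xs, picking each position k in order (lex order for sorted xs);
-- fuel only guards termination (xs shrinks by one per level).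
def pvPermsB (fuel : Nat) (xs : List Int) : List (List Int) :=
  if xs = [] then [[]]
  else match fuel with
  | 0 => []
  | fuel+1 =>
    (PySem.List.pyRange 0 (xs.length : Int) 1).foldl
      (fun out k => out ++
        (pvPermsB fuel (PySem.List.slice xs none (some k) ++ PySem.List.slice xs (some (k+1)) none)).map
          (fun p => PySem.List.pyGetD xs k 0 :: p)) []

-- ok(perm): simulate the work vector along perm
def pvOk (allocation need : List (List Int)) (m : Int) : List Int → List Int → Bool
  | _, [] => true
  | work, i :: rest =>
    if !(pvFeas need m i work) then false
    else pvOk allocation need m (pvNewWork allocation m i work) rest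

def all_safe_sequences_alt (allocation : List (List Int)) (max_need : List (List Int)) (available : List Int) : List (List Int) :=
  let n : Int := allocation.length
  let m : Int := available.length
  let need := pvNeed allocation max_need n m
  (pvPermsB allocation.length (PySem.List.pyRange 0 n 1)).filter
    (fun perm => pvOk allocation need m available perm)

-- ===== PRECONDITION & SPEC =====
-- Exactly the inputs on which Python A returns: when m = len(available) > 0 every indexed
-- row must exist and be long enough (otherwise `max_need[i][j]` / `allocation[i][j]` raises
-- IndexError); when m = 0 no element is ever indexed.
def Pre_all_safe_sequences (allocation : List (List Int)) (max_need : List (List Int)) (available : List Int) : Prop :=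
  available = [] ∨
  (allocation.length ≤ max_need.length ∧
   (∀ row ∈ allocation, available.length ≤ row.length) ∧
   (∀ row ∈ max_need.take allocation.length, available.length ≤ row.length))
instance (allocation : List (List Int)) (max_need : List (List Int)) (available : List Int) : Decidable (Pre_all_safe_sequences allocation max_need available) := by unfold Pre_all_safe_sequences; infer_instance

def pvWitness_all_safe_sequences : List (List Int) × List (List Int) × List Int := ([[1]], [[1]], [0])

def Spec_all_safe_sequences (allocation : List (List Int)) (max_need : List (List Int)) (available : List Int) (out : List (List Int)) : Prop := out = all_safe_sequences_alt allocation max_need available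
instance (allocation : List (List Int)) (max_need : List (List Int)) (available : List Int) (out : List (List Int)) : Decidable (Spec_all_safe_sequences allocation max_need available out) := by unfold Spec_all_safe_sequences; infer_instance

-- ===== CLAIM (what is proved, stated in full; the proofs are below) =====
def Claim_equal_all_safe_sequences : Prop := ∀ (allocation : List (List Int)) (max_need : List (List Int)) (available : List Int), Dom_all_safe_sequences allocation max_need available → Pre_all_safe_sequences allocation max_need available → Spec_all_safe_sequences allocation max_need available (all_safe_sequences allocation max_need available)

-- ===== LEMMAS AND PROOFS =====

-- common functional spec: DFS over the remaining index list as a value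
def pvSafe (allocation need : List (List Int)) (m : Int) (work : List Int) (rem : List Int) : List (List Int) :=
  if rem = [] then [[]]
  else rem.attach.flatMap (fun x =>
    if pvFeas need m x.1 work then
      (pvSafe allocation need m (pvNewWork allocation m x.1 work)
        (rem.filter (fun y => y ≠ x.1))).map (fun p => x.1 :: p)
    else [])
termination_by rem.length
decreasing_by
  simp
  have h2 : (List.filter (fun (y : {z // z ∈ rem}) => !decide ((y : Int) = ↑x)) rem.attach).length < rem.attach.length := by
    rw [List.length_filter_lt_length_iff_exists]
    exact ⟨x, List.mem_attach _ _, by simp⟩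
  exact h2.trans_eq List.length_attach

theorem pvSafe_ne_nil (allocation need : List (List Int)) (m : Int) (work : List Int)
    (rem : List Int) (h : rem ≠ []) :
    pvSafe allocation need m work rem
      = rem.flatMap (fun i =>
          if pvFeas need m i work then
            (pvSafe allocation need m (pvNewWork allocation m i work)
              (rem.filter (fun y => y ≠ i))).map (fun p => i :: p)
          else []) := by
  have h1 := List.flatMap_map (f := (Subtype.val : {z // z ∈ rem} → Int))
    (g := fun i => if pvFeas need m i work = true then
        List.map (fun p => i :: p) (pvSafe allocation need m (pvNewWork allocation m i work)
          (List.filter (fun y => decide (y ≠ i)) rem))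
      else [])
    (l := rem.attach)
  rw [List.attach_map_subtype_val] at h1
  rw [pvSafe, if_neg h, h1]


theorem pv_filter_flatMap {α β : Type} (l : List α) (g : α → List β) (p : β → Bool) :
    (l.flatMap g).filter p = l.flatMap (fun x => (g x).filter p) := by
  induction l with
  | nil => simp
  | cons a t ih => simp [List.filter_append, ih]

theorem pv_flatMap_congr {α β : Type} (l : List α) (f g : α → List β)
    (h : ∀ x ∈ l, f x = g x) : l.flatMap f = l.flatMap g := by
  induction l with
  | nil => simp
  | cons a t ih =>
    simp only [List.flatMap_cons]
    rw [h a (by simp), ih (fun x hx => h x (by simp [hx]))]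

theorem pv_length_filter_ne (l : List Int) (i : Int) (hnd : l.Nodup) (hi : i ∈ l) :
    (l.filter (fun y => decide (y ≠ i))).length = l.length - 1 := by
  have he : l.filter (fun y => decide (y ≠ i)) = l.erase i := by
    rw [List.Nodup.erase_eq_filter hnd]
    apply List.filter_congr
    intro x _
    simp [bne]
    exact Eq.symm (Bool.beq_eq_decide_eq x i)
  rw [he, List.length_erase_of_mem hi]

theorem pv_eraseIdx_filter (xs : List Int) :
    ∀ (k : Nat), xs.Nodup → (h : k < xs.length) →
    xs.eraseIdx k = xs.filter (fun y => decide (y ≠ xs[k])) := by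
  induction xs with
  | nil => intro k _ h; simp at h
  | cons a t ih =>
    intro k hnd hk
    rw [List.nodup_cons] at hnd
    match k with
    | 0 =>
      simp only [List.eraseIdx, List.getElem_cons_zero]
      rw [List.filter_cons_of_neg (by simp)]
      symm
      apply List.filter_eq_self.2
      intro x hx
      simp
      exact fun he => hnd.1 (he ▸ hx)
    | Nat.succ k =>
      have hk' : k < t.length := by simpa using hk
      simp only [List.eraseIdx, List.getElem_cons_succ]
      rw [List.filter_cons_of_pos (by
        simp
        exact fun he => hnd.1 (he ▸ t.getElem_mem hk')), ih k hnd.2 hk']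
      rfl

-- indices of False entries of done, as Python ints
def pvFalseIdx (done : List Bool) : List Int :=
  (PySem.List.pyRange 0 (done.length : Int) 1).filter (fun i => ! PySem.List.pyGetD done i false)

theorem pvFalseIdx_nodup (done : List Bool) : (pvFalseIdx done).Nodup :=
  (PySem.List.nodup_pyRange_one 0 done.length).filter _

theorem pvFalseIdx_replicate (k : Nat) :
    pvFalseIdx (List.replicate k false) = PySem.List.pyRange 0 (k : Int) 1 := by
  unfold pvFalseIdx
  rw [List.length_replicate]
  apply List.filter_eq_self.2
  intro x hx
  rcases (PySem.List.mem_pyRange_one).1 hx with ⟨h0, h1⟩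
  lift x to ℕ using h0
  simp

theorem pvFalseIdx_set (done : List Bool) (i : Int) (hi : i ∈ pvFalseIdx done) :
    pvFalseIdx (done.set i.toNat true) = (pvFalseIdx done).filter (fun y => y ≠ i) := by
  unfold pvFalseIdx at hi ⊢
  rcases List.mem_filter.1 hi with ⟨hmem, _⟩
  rcases (PySem.List.mem_pyRange_one).1 hmem with ⟨h0, h1⟩
  rw [List.length_set, List.filter_filter]
  apply List.filter_congr
  intro x hx
  rcases (PySem.List.mem_pyRange_one).1 hx with ⟨hx0, hx1⟩
  lift x to ℕ using hx0
  lift i to ℕ using h0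
  by_cases hxi : x = i
  · subst hxi
    have hx' : x < done.length := by exact_mod_cast h1
    simp [PySem.List.pyGetD_natCast, List.getD, List.getElem?_set_self hx']
  · have hne : ((x:Int)) ≠ (i:Int) := by exact_mod_cast hxi
    simp [PySem.List.pyGetD_natCast, List.getD, List.getElem?_set_ne (Ne.symm hxi), hne]

theorem pv_btA_eq (allocation need : List (List Int)) (m : Int) :
    ∀ (fuel : Nat) (work : List Int) (done : List Bool) (seq : List Int) (res : List (List Int)),
    done.length = allocation.length →
    seq.length + (pvFalseIdx done).length = allocation.length →
    (pvFalseIdx done).length < fuel →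
    pvBacktrack allocation need (allocation.length : Int) m fuel work done seq res
      = res ++ (pvSafe allocation need m work (pvFalseIdx done)).map (fun p => seq ++ p) := by
  intro fuel
  induction fuel with
  | zero => intro work done seq res _ _ h3; omega
  | succ fuel IH =>
    intro work done seq res hlen hcnt hfuel
    by_cases hrem : pvFalseIdx done = []
    · have hseq : seq.length = allocation.length := by rw [hrem] at hcnt; simpa using hcnt
      simp only [pvBacktrack]
      rw [if_pos (by exact_mod_cast hseq), hrem, pvSafe]
      simp
    · have hlen0 : (pvFalseIdx done).length ≠ 0 := fun h0 => hrem (List.length_eq_zero_iff.1 h0)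
      have hne : ¬ ((seq.length : Int) = ((allocation.length : Nat) : Int)) := by
        intro h
        have : seq.length = allocation.length := by exact_mod_cast h
        omega
      simp only [pvBacktrack]
      rw [if_neg hne]
      have hrange : (PySem.List.pyRange 0 ((allocation.length : Nat) : Int) 1)
          = (PySem.List.pyRange 0 ((done.length : Nat) : Int) 1) := by rw [hlen]
      rw [hrange]
      have hbody :
          (PySem.List.pyRange 0 ((done.length : Nat) : Int) 1).foldl
            (fun acc i => if (!(PySem.List.pyGetD done i false)) && pvFeas need m i work then
                pvBacktrack allocation need ((allocation.length : Nat) : Int) m fuel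
                  (pvNewWork allocation m i work) (done.set i.toNat true) (seq ++ [i]) acc
              else acc) res
          = (pvFalseIdx done).foldl
            (fun acc i => if pvFeas need m i work then
                pvBacktrack allocation need ((allocation.length : Nat) : Int) m fuel
                  (pvNewWork allocation m i work) (done.set i.toNat true) (seq ++ [i]) acc
              else acc) res := by
        unfold pvFalseIdx
        rw [List.foldl_filter]
        apply PySem.List.foldl_congr_mem'
        intro i _ acc
        by_cases h1 : PySem.List.pyGetD done i false
        · simp [h1]
        · by_cases h2 : pvFeas need m i work <;> simp [h1, h2]
      rw [hbody]
      have hstep : ∀ acc, ∀ i ∈ pvFalseIdx done,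
          (if pvFeas need m i work then
              pvBacktrack allocation need ((allocation.length : Nat) : Int) m fuel
                (pvNewWork allocation m i work) (done.set i.toNat true) (seq ++ [i]) acc
            else acc)
          = acc ++ (if pvFeas need m i work then
              (pvSafe allocation need m (pvNewWork allocation m i work)
                ((pvFalseIdx done).filter (fun y => decide (y ≠ i)))).map (fun p => (seq ++ [i]) ++ p)
            else []) := by
        intro acc i hi
        by_cases hf : pvFeas need m i work
        · rw [if_pos hf, if_pos hf]
          have hset : pvFalseIdx (done.set i.toNat true)
              = (pvFalseIdx done).filter (fun y => decide (y ≠ i)) := pvFalseIdx_set done i hi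
          have hflen : ((pvFalseIdx done).filter (fun y => decide (y ≠ i))).length
              = (pvFalseIdx done).length - 1 :=
            pv_length_filter_ne _ _ (pvFalseIdx_nodup done) hi
          rw [IH _ (done.set i.toNat true) _ acc (by simpa using hlen)
              (by rw [hset, hflen]; simp; omega)
              (by rw [hset, hflen]; omega), hset]
        · simp [hf]
      rw [PySem.List.foldl_congr_mem' _ _ _ _ (fun i hi acc => hstep acc i hi),
        PySem.List.foldl_append_eq_flatMap]
      rw [pvSafe_ne_nil _ _ _ _ _ hrem, List.map_flatMap]
      congr 1
      apply pv_flatMap_congr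
      intro i _
      by_cases hf : pvFeas need m i work
      · simp [hf, List.map_map, Function.comp_def, List.append_assoc]
      · simp [hf]

theorem pv_permsB_filter (allocation need : List (List Int)) (m : Int) :
    ∀ (fuel : Nat) (xs : List Int) (work : List Int), xs.Nodup → xs.length ≤ fuel →
    (pvPermsB fuel xs).filter (fun perm => pvOk allocation need m work perm)
      = pvSafe allocation need m work xs := by
  intro fuel
  induction fuel with
  | zero =>
    intro xs work hnd hle
    have hx : xs = [] := List.length_eq_zero_iff.1 (Nat.le_zero.1 hle)
    subst hx
    rw [pvPermsB, pvSafe]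
    simp [pvOk]
  | succ fuel IH =>
    intro xs work hnd hle
    by_cases hxs : xs = []
    · subst hxs
      rw [pvPermsB, pvSafe]
      simp [pvOk]
    · have hunf : pvPermsB (fuel+1) xs
          = (PySem.List.pyRange 0 (xs.length : Int) 1).foldl
              (fun out k => out ++
                (pvPermsB fuel (PySem.List.slice xs none (some k) ++ PySem.List.slice xs (some (k+1)) none)).map
                  (fun p => PySem.List.pyGetD xs k 0 :: p)) [] := by
        rw [pvPermsB, if_neg hxs]
      rw [hunf, PySem.List.foldl_append_eq_flatMap, List.nil_append, pv_filter_flatMap]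
      have hcong : ∀ k ∈ PySem.List.pyRange 0 (xs.length : Int) 1,
          ((pvPermsB fuel (PySem.List.slice xs none (some k) ++ PySem.List.slice xs (some (k+1)) none)).map
              (fun p => PySem.List.pyGetD xs k 0 :: p)).filter (fun perm => pvOk allocation need m work perm)
          = (fun i => if pvFeas need m i work then
                (pvSafe allocation need m (pvNewWork allocation m i work)
                  (xs.filter (fun y => decide (y ≠ i)))).map (fun p => i :: p)
              else []) (PySem.List.pyGetD xs k 0) := by
        intro k hk
        rcases (PySem.List.mem_pyRange_one).1 hk with ⟨hk0, hk1⟩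
        lift k to ℕ using hk0
        have hkn : k < xs.length := by exact_mod_cast hk1
        have hsl : PySem.List.slice xs none (some (k : Int)) ++ PySem.List.slice xs (some ((k : Int)+1)) none
            = xs.eraseIdx k := by
          have hc : ((k : Int)+1) = (((k+1 : Nat)) : Int) := by push_cast; ring
          rw [PySem.List.slice_to_natCast, hc, PySem.List.slice_from_natCast]
          exact (List.eraseIdx_eq_take_drop_succ xs k).symm
        have hget : PySem.List.pyGetD xs (k : Int) 0 = xs[k] := by
          rw [PySem.List.pyGetD_natCast, List.getD_eq_getElem _ _ hkn]
        rw [hsl, hget, List.filter_map]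
        have hpred : ((fun perm => pvOk allocation need m work perm) ∘ (fun p => xs[k] :: p))
            = fun p => if !(pvFeas need m xs[k] work) then false
                else pvOk allocation need m (pvNewWork allocation m xs[k] work) p := rfl
        rw [hpred]
        show _ = if pvFeas need m xs[k] work then
            (pvSafe allocation need m (pvNewWork allocation m xs[k] work)
              (xs.filter (fun y => decide (y ≠ xs[k])))).map (fun p => xs[k] :: p)
          else []
        by_cases hf : pvFeas need m xs[k] work
        · rw [if_pos hf]
          have hpred2 : (fun p => if !(pvFeas need m xs[k] work) then false
                else pvOk allocation need m (pvNewWork allocation m xs[k] work) p)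
              = fun p => pvOk allocation need m (pvNewWork allocation m xs[k] work) p := by
            funext p; simp [hf]
          rw [hpred2,
            IH (xs.eraseIdx k) _ (hnd.eraseIdx k)
              (by rw [List.length_eraseIdx]; simp [hkn]; omega),
            pv_eraseIdx_filter xs k hnd hkn]
        · rw [if_neg hf]
          have hpred3 : (fun p => if !(pvFeas need m xs[k] work) then false
                else pvOk allocation need m (pvNewWork allocation m xs[k] work) p)
              = fun _ => false := by
            funext p; simp [hf]
          rw [hpred3]
          simp
      rw [pv_flatMap_congr _ _ _ hcong,
        ← List.flatMap_map (fun x => PySem.List.pyGetD xs x 0)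
          (fun i => if pvFeas need m i work = true then
              List.map (fun p => i :: p)
                (pvSafe allocation need m (pvNewWork allocation m i work)
                  (List.filter (fun y => decide (y ≠ i)) xs))
            else []) (PySem.List.pyRange 0 (xs.length : Int) 1),
        PySem.List.map_pyGetD_pyRange_zero', pvSafe_ne_nil _ _ _ _ _ hxs]

-- ===== VERDICT (by name: the statement is the Claim_ definition above) =====
theorem all_safe_sequences_spec : Claim_equal_all_safe_sequences := by
  intro allocation max_need available _ _
  unfold Spec_all_safe_sequences all_safe_sequences all_safe_sequences_alt
  rw [pv_btA_eq allocation _ _ _ available (List.replicate allocation.length false) [] []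
      (by simp) (by simp [pvFalseIdx_replicate]) (by simp [pvFalseIdx_replicate]),
    pv_permsB_filter allocation _ _ _ _ available
      (PySem.List.nodup_pyRange_one 0 allocation.length) (by simp),
    pvFalseIdx_replicate]
  simp
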